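-- pv_equiv track=rewrite | github.com/pypi-data/pypi-mirror-27 | packages/rapidpro_controller/rapidpro_controller-0.2.4.tar.gz/rapidpro_controller-0.2.4/rapidpro_controller/dump.py | get_timecodes
-- ===== SOURCE A (Python) =====
-- def get_timecodes(shortcut):
--     if shortcut == 'every-5-minutes':
--         return [str(h).zfill(2) + str(m).zfill(2)
--                 for h in range(0, 24)
--                 for m in range(0, 60, 5)]
--     elif shortcut == 'every-30-minutes':
--         return [str(h).zfill(2) + str(m).zfill(2)
--                 for h in range(0, 24)
--                 for m in range(0, 60, 30)]
--     return []
-- ===== SOURCE B (Python) =====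
-- def get_timecodes(shortcut):
--     steps = {'every-5-minutes': 5, 'every-30-minutes': 30}
--     step = steps.get(shortcut)
--     if step is None:
--         return []
--     res = []
--     for t in range(0, 24 * 60, step):
--         h, m = t // 60, t % 60
--         res.append(str(h).zfill(2) + str(m).zfill(2))
--     return res
-- ===== Notes on version B (the rewrite author's own statement) =====
-- stated objective: simpler
-- what changed: Replaces the two duplicated nested hour/minute comprehensions with one table lookup for the step and a single flat pass over minutes-of-day 0..1439, recovering hour and minute by // and %.
import Mathlib
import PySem

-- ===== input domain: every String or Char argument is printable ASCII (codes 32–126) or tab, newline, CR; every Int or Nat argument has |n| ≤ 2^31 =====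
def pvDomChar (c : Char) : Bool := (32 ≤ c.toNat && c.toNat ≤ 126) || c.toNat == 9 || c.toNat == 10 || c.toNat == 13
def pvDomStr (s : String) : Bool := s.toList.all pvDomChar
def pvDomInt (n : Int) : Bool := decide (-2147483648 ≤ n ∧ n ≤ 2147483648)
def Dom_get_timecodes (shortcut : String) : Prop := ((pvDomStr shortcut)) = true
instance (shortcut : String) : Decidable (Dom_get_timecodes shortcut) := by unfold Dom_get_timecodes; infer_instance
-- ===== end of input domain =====

-- B replaces A's two duplicated nested hour/minute comprehensions with a step lookup and one flat pass over minutes-of-day (simpler; same cost).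
-- ===== PORT A =====
-- literal transliteration of A: two nested comprehensions, one per shortcut
def get_timecodes (shortcut : String) : List String :=
  if shortcut == "every-5-minutes" then
    (PySem.List.pyRange 0 24 1).flatMap (fun h =>
      (PySem.List.pyRange 0 60 5).map (fun m =>
        PySem.Str.zfill (PySem.Int.toStr h) 2 ++ PySem.Str.zfill (PySem.Int.toStr m) 2))
  else if shortcut == "every-30-minutes" then
    (PySem.List.pyRange 0 24 1).flatMap (fun h =>
      (PySem.List.pyRange 0 60 30).map (fun m =>
        PySem.Str.zfill (PySem.Int.toStr h) 2 ++ PySem.Str.zfill (PySem.Int.toStr m) 2))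
  else []

-- ===== PORT B =====
-- B: dict lookup for the step, then one flat pass over minutes-of-day with //, %
def get_timecodes_alt (shortcut : String) : List String :=
  let steps : PySem.Dict String Int := PySem.Dict.ofList [("every-5-minutes", 5), ("every-30-minutes", 30)]
  match PySem.Dict.get? steps shortcut with
  | none => []
  | some step =>
    (PySem.List.pyRange 0 (24 * 60) step).foldl (fun res t =>
      res ++ [PySem.Str.zfill (PySem.Int.toStr (PySem.Int.floordiv t 60)) 2 ++
              PySem.Str.zfill (PySem.Int.toStr (PySem.Int.mod t 60)) 2]) []

-- ===== PRECONDITION & SPEC =====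
def Spec_get_timecodes (shortcut : String) (out : List String) : Prop := out = get_timecodes_alt shortcut
instance (shortcut : String) (out : List String) : Decidable (Spec_get_timecodes shortcut out) := by unfold Spec_get_timecodes; infer_instance

-- ===== CLAIM (what is proved, stated in full; the proofs are below) =====
def Claim_equal_get_timecodes : Prop := ∀ (shortcut : String), Dom_get_timecodes shortcut → Spec_get_timecodes shortcut (get_timecodes shortcut)

-- ===== LEMMAS AND PROOFS =====

-- ===== VERDICT (by name: the statement is the Claim_ definition above) =====
set_option maxRecDepth 20000 in
theorem get_timecodes_spec : Claim_equal_get_timecodes := by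
  intro s _
  unfold Spec_get_timecodes get_timecodes get_timecodes_alt
  by_cases h5 : s = "every-5-minutes"
  · subst h5; decide
  · by_cases h30 : s = "every-30-minutes"
    · subst h30; decide
    · have e5 : ("every-5-minutes" == s) = false := by simp [Ne.symm h5]
      have e30 : ("every-30-minutes" == s) = false := by simp [Ne.symm h30]
      simp [h5, h30, e5, e30, PySem.Dict.get?, PySem.Dict.ofList, PySem.Dict.update,
            PySem.Dict.empty, PySem.Dict.insert, List.find?]
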